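-- pv_equiv track=rewrite | github.com/Teycir/PygubuAI | src/pygubuai/accessibility.py | check_accessibility
-- ===== SOURCE A (Python) =====
-- from typing import Dict, List, Tuple
--
-- def validate_keyboard_navigation(widgets: List[Dict]) -> List[str]:
--     """Validate keyboard navigation setup."""
--     issues = []
--     has_focus = any(w.get("takefocus") == "1" for w in widgets)
--
--     if not has_focus:
--         issues.append("No widgets have keyboard focus enabled")
--
--     buttons = [w for w in widgets if w.get("class") == "ttk.Button"]
--     if buttons and not any(b.get("underline") for b in buttons):
--         issues.append("Buttons lack keyboard shortcuts (underline)")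
--
--     return issues
--
-- def check_accessibility(ui_data: Dict) -> Dict[str, List[str]]:
--     """Run accessibility checks on UI data."""
--     issues = {
--         "contrast": [],
--         "keyboard": [],
--         "labels": []
--     }
--
--     widgets = ui_data.get("widgets", [])
--
--     # Check keyboard navigation
--     issues["keyboard"] = validate_keyboard_navigation(widgets)
--
--     # Check for missing labels
--     for widget in widgets:
--         if widget.get("class") in ["ttk.Entry", "ttk.Combobox"] and not widget.get("label"):
--             issues["labels"].append(f"Widget {widget.get('id')} missing label")
--
--     return {k: v for k, v in issues.items() if v}
-- ===== SOURCE B (Python) =====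
-- def check_accessibility(ui_data):
--     """Run accessibility checks on UI data (single-pass over widgets)."""
--     widgets = ui_data.get("widgets", [])
--     has_focus = False
--     saw_button = False
--     any_button_underlined = False
--     labels = []
--     for w in widgets:
--         if w.get("takefocus") == "1":
--             has_focus = True
--         cls = w.get("class")
--         if cls == "ttk.Button":
--             saw_button = True
--             if w.get("underline"):
--                 any_button_underlined = True
--         if cls in ("ttk.Entry", "ttk.Combobox") and not w.get("label"):
--             labels.append(f"Widget {w.get('id')} missing label")
--     keyboard = []
--     if not has_focus:
--         keyboard.append("No widgets have keyboard focus enabled")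
--     if saw_button and not any_button_underlined:
--         keyboard.append("Buttons lack keyboard shortcuts (underline)")
--     result = {}
--     if keyboard:
--         result["keyboard"] = keyboard
--     if labels:
--         result["labels"] = labels
--     return result
-- ===== Notes on version B (the rewrite author's own statement) =====
-- stated objective: simpler
-- what changed: Replaced the helper-based multi-pass version (any/filter/any plus a separate label loop and a dict-comprehension filter) by one loop over widgets maintaining flags and the label list, then direct assembly of the result dict.
import Mathlib
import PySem

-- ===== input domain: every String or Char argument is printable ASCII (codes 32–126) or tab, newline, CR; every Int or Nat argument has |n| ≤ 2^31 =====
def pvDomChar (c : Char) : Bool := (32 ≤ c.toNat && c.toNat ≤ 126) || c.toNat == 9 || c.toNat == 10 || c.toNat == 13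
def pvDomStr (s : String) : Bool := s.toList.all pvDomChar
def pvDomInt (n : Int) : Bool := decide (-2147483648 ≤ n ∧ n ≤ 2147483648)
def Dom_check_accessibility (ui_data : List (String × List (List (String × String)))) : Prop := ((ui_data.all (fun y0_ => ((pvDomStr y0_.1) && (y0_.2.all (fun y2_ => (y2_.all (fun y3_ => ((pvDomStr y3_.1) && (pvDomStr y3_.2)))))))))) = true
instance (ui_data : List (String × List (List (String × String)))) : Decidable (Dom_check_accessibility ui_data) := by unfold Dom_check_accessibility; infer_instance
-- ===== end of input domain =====

-- ===== PORT A =====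
-- B changes the decomposition only: one loop over widgets with flags instead of A's multi-pass helper; objective: simpler.
-- shared primitive: Python dict.get on an association list (first match)
def pvLookup (d : List (String × String)) (k : String) : Option String :=
  match d with
  | [] => none
  | (a, b) :: t => if a == k then some b else pvLookup t k

-- Python truthiness of an optional string (None and "" are falsy)
def pvTruthy (o : Option String) : Bool :=
  match o with
  | none => false
  | some s => s != ""

-- f-string rendering of widget.get('id') (None prints as "None")
def pvIdStr (o : Option String) : String :=
  match o with
  | none => "None"
  | some s => s

def pvLookupW (d : List (String × List (List (String × String)))) (k : String) :
    Option (List (List (String × String))) :=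
  match d with
  | [] => none
  | (a, b) :: t => if a == k then some b else pvLookupW t k

def validate_keyboard_navigation (widgets : List (List (String × String))) : List String :=
  let issues : List String := []
  let has_focus := widgets.any (fun w => pvLookup w "takefocus" == some "1")
  let issues := if !has_focus then issues ++ ["No widgets have keyboard focus enabled"] else issues
  let buttons := widgets.filter (fun w => pvLookup w "class" == some "ttk.Button")
  let issues :=
    if !buttons.isEmpty && !(buttons.any (fun b => pvTruthy (pvLookup b "underline"))) then
      issues ++ ["Buttons lack keyboard shortcuts (underline)"]
    else issues
  issues

def check_accessibility (ui_data : List (String × List (List (String × String)))) : List (String × List String) :=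
  let widgets := (pvLookupW ui_data "widgets").getD []
  let keyboard := validate_keyboard_navigation widgets
  let labels := widgets.foldl
    (fun acc w =>
      if (pvLookup w "class" == some "ttk.Entry" || pvLookup w "class" == some "ttk.Combobox")
          && !pvTruthy (pvLookup w "label") then
        acc ++ ["Widget " ++ pvIdStr (pvLookup w "id") ++ " missing label"]
      else acc)
    []
  ([("contrast", ([] : List String)), ("keyboard", keyboard), ("labels", labels)]).filter
    (fun kv => !kv.2.isEmpty)

-- ===== PORT B =====
-- loop state: (has_focus, saw_button, any_button_underlined, labels)
def pvStepB (st : Bool × Bool × Bool × List String) (w : List (String × String)) :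
    Bool × Bool × Bool × List String :=
  let hf := if pvLookup w "takefocus" == some "1" then true else st.1
  let cls := pvLookup w "class"
  let sb := if cls == some "ttk.Button" then true else st.2.1
  let au := if cls == some "ttk.Button" && pvTruthy (pvLookup w "underline") then true else st.2.2.1
  let ls := if (cls == some "ttk.Entry" || cls == some "ttk.Combobox")
                && !pvTruthy (pvLookup w "label") then
              st.2.2.2 ++ ["Widget " ++ pvIdStr (pvLookup w "id") ++ " missing label"]
            else st.2.2.2
  (hf, sb, au, ls)

def check_accessibility_alt (ui_data : List (String × List (List (String × String)))) : List (String × List String) :=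
  let widgets := (pvLookupW ui_data "widgets").getD []
  let st := widgets.foldl pvStepB (false, false, false, [])
  let keyboard : List String := []
  let keyboard := if !st.1 then keyboard ++ ["No widgets have keyboard focus enabled"] else keyboard
  let keyboard := if st.2.1 && !st.2.2.1 then keyboard ++ ["Buttons lack keyboard shortcuts (underline)"] else keyboard
  let result : List (String × List String) := []
  let result := if !keyboard.isEmpty then result ++ [("keyboard", keyboard)] else result
  let result := if !st.2.2.2.isEmpty then result ++ [("labels", st.2.2.2)] else result
  result

-- ===== PRECONDITION & SPEC =====
def Spec_check_accessibility (ui_data : List (String × List (List (String × String)))) (out : List (String × List String)) : Prop := out = check_accessibility_alt ui_data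
instance (ui_data : List (String × List (List (String × String)))) (out : List (String × List String)) : Decidable (Spec_check_accessibility ui_data out) := by unfold Spec_check_accessibility; infer_instance

-- ===== CLAIM (what is proved, stated in full; the proofs are below) =====
def Claim_equal_check_accessibility : Prop := ∀ (ui_data : List (String × List (List (String × String)))), Dom_check_accessibility ui_data → Spec_check_accessibility ui_data (check_accessibility ui_data)

-- ===== LEMMAS AND PROOFS =====
def pvLblCond (w : List (String × String)) : Bool :=
  (pvLookup w "class" == some "ttk.Entry" || pvLookup w "class" == some "ttk.Combobox")
    && !pvTruthy (pvLookup w "label")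
def pvLblMsg (w : List (String × String)) : String :=
  "Widget " ++ pvIdStr (pvLookup w "id") ++ " missing label"

theorem foldB_spec (ws : List (List (String × String))) :
    ∀ (b1 b2 b3 : Bool) (l : List String),
    ws.foldl pvStepB (b1, b2, b3, l) =
      (b1 || ws.any (fun w => pvLookup w "takefocus" == some "1"),
       b2 || ws.any (fun w => pvLookup w "class" == some "ttk.Button"),
       b3 || ws.any (fun w => pvLookup w "class" == some "ttk.Button"
                      && pvTruthy (pvLookup w "underline")),
       l ++ (ws.filter pvLblCond).map pvLblMsg) := by
  induction ws with
  | nil => simp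
  | cons w t ih =>
    intro b1 b2 b3 l
    simp only [List.foldl_cons, pvStepB, ih, List.any_cons, List.filter_cons]
    by_cases h1 : pvLookup w "takefocus" == some "1" <;>
      by_cases h2 : pvLookup w "class" == some "ttk.Button" <;>
        by_cases h3 : pvLblCond w <;>
          cases b1 <;> cases b2 <;> cases b3 <;>
            simp_all [pvLblCond, pvLblMsg] <;>
              split <;> simp_all [pvLblMsg, List.append_assoc]

theorem any_filter_underline (ws : List (List (String × String))) :
    ((ws.filter (fun w => pvLookup w "class" == some "ttk.Button")).any
        (fun b => pvTruthy (pvLookup b "underline"))) =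
      ws.any (fun w => pvLookup w "class" == some "ttk.Button"
                && pvTruthy (pvLookup w "underline")) := by
  induction ws with
  | nil => rfl
  | cons w t ih =>
    by_cases h : pvLookup w "class" == some "ttk.Button" <;>
      simp_all [List.filter_cons, List.any_cons]

theorem isEmpty_filter_btn (ws : List (List (String × String))) :
    (ws.filter (fun w => pvLookup w "class" == some "ttk.Button")).isEmpty =
      !ws.any (fun w => pvLookup w "class" == some "ttk.Button") := by
  induction ws with
  | nil => rfl
  | cons w t ih =>
    by_cases h : pvLookup w "class" == some "ttk.Button" <;>
      simp_all [List.filter_cons, List.any_cons]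

theorem labels_foldl (ws : List (List (String × String))) :
    ws.foldl
      (fun acc w =>
        if (pvLookup w "class" == some "ttk.Entry" || pvLookup w "class" == some "ttk.Combobox")
            && !pvTruthy (pvLookup w "label") then
          acc ++ ["Widget " ++ pvIdStr (pvLookup w "id") ++ " missing label"]
        else acc)
      [] = (ws.filter pvLblCond).map pvLblMsg := by
  have key : ∀ (t : List (List (String × String))) (acc : List String),
      t.foldl
        (fun acc w =>
          if (pvLookup w "class" == some "ttk.Entry" || pvLookup w "class" == some "ttk.Combobox")
              && !pvTruthy (pvLookup w "label") then
            acc ++ ["Widget " ++ pvIdStr (pvLookup w "id") ++ " missing label"]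
          else acc)
        acc = acc ++ (t.filter pvLblCond).map pvLblMsg := by
    intro t
    induction t with
    | nil => simp
    | cons w t ih =>
      intro acc
      by_cases h : pvLblCond w <;>
        simp_all [pvLblCond, pvLblMsg, List.filter_cons]
  simpa using key ws []

-- ===== VERDICT (by name: the statement is the Claim_ definition above) =====
theorem check_accessibility_spec : Claim_equal_check_accessibility := by
  intro ui_data _
  unfold Spec_check_accessibility check_accessibility check_accessibility_alt
    validate_keyboard_navigation
  simp only [foldB_spec, labels_foldl, any_filter_underline, isEmpty_filter_btn,
    Bool.false_or, List.nil_append]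
  generalize (pvLookupW ui_data "widgets").getD [] = ws
  generalize ws.any (fun w => pvLookup w "takefocus" == some "1") = hf
  generalize hau : ws.any (fun w => pvLookup w "class" == some "ttk.Button"
                    && pvTruthy (pvLookup w "underline")) = au
  generalize ws.any (fun w => pvLookup w "class" == some "ttk.Button") = sb
  generalize (ws.filter pvLblCond).map pvLblMsg = L
  cases hf <;> cases sb <;> cases au <;> cases L <;>
    simp [List.filter_cons]
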